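-- pv_equiv track=rewrite | github.com/HugoMFFernandes/Exerc-cios_Pc_1 | Python/Exames/Exame_2024_B_v2.py | Transforma_matriz
-- ===== SOURCE A (Python) =====
-- def Transforma_matriz(A):
--     for i in range(len(A)):
--         max=A[i][0]
--         min=A[i][0]
--         id_max=[]
--         id_min=[]
--         #Encontrar o maximo e o minimo
--         for j in range(1,len(A[0])):
--             if A[i][j]>max:
--                 max=A[i][j]
--
--             elif A[i][j]<min:
--                 min=A[i][j]
--
--         #Encontrar a posição dos elementos maximos e minimos
--         for j in range(len(A[i])):
--             if A[i][j]==max: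
--                 id_max.append(j)
--             elif A[i][j]==min:
--                 id_min.append(j)
--
--         #Trocar elementos
--         for k in range(len(id_max)):
--             A[i][id_max[k]]=min
--
--         for k in range(len(id_min)):
--             A[i][id_min[k]]=max
--
--     return A
-- ===== SOURCE B (Python) =====
-- def Transforma_matriz(A):
--     # Sort each row's first len(A[0]) entries to pick the extremes from the
--     # ends of the sorted copy, then substitute through a two-entry swap table
--     # instead of conditional comparisons.  Rows are replaced wholesale (A[i]
--     # reassigned); the returned value equals A's.
--     if not A:
--         return A
--     w = len(A[0])
--     for i in range(len(A)):
--         s = sorted(A[i][:w])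
--         swap = {s[-1]: s[0], s[0]: s[-1]}
--         A[i] = [swap.get(x, x) for x in A[i]]
--     return A
-- ===== Notes on version B (the rewrite author's own statement) =====
-- stated objective: alternative
-- what changed: Instead of A's four per-row passes (running max/min scan with elif, collection of id_max/id_min position lists, two write-back loops over those lists), B sorts a copy of the row's first len(A[0]) entries to take the extremes from its two ends and rewrites the row in one pass through a two-entry swap dictionary {max: min, min: max} looked up with .get.
import Mathlib
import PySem

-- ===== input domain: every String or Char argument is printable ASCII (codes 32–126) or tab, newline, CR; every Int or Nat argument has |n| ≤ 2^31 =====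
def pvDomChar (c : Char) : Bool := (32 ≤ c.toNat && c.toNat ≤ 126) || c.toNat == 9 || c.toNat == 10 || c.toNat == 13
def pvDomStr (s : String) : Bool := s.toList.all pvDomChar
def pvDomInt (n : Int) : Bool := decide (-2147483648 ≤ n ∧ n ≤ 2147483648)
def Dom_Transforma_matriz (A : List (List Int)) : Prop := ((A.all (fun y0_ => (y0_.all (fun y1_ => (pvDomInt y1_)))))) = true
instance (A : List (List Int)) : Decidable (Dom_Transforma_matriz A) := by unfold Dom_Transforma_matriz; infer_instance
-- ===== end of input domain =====

-- B swaps each row's max and min by sorting a copy of the row's first len(A[0]) entries,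
-- taking the extremes from the sorted copy's two ends, and substituting through a two-entry
-- swap dictionary in a single rewrite pass — instead of A's elif running scan, id_max/id_min
-- index lists and two write-back loops (objective: alternative).  A mutates rows element-wise,
-- B replaces them; the proved equivalence is about the RETURN value.

-- ===== PORT A =====
-- the 'for j in range(1, len(A[0]))' running max/min scan (elif!), starting from A[i][0]
def pvScanMaxMin (row : List Int) (w : Int) : Int × Int :=
  let x0 := PySem.List.pyGetD row 0 0
  (PySem.List.pyRange 1 w 1).foldl
    (fun (p : Int × Int) j =>
      if PySem.List.pyGetD row j 0 > p.1 then (PySem.List.pyGetD row j 0, p.2)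
      else if PySem.List.pyGetD row j 0 < p.2 then (p.1, PySem.List.pyGetD row j 0)
      else p) (x0, x0)

-- the 'for j in range(len(A[i]))' pass building id_max and id_min
def pvIds (row : List Int) (mx mn : Int) : List Int × List Int :=
  (PySem.List.pyRange 0 (row.length : Int) 1).foldl
    (fun (p : List Int × List Int) j =>
      if PySem.List.pyGetD row j 0 = mx then (p.1 ++ [j], p.2)
      else if PySem.List.pyGetD row j 0 = mn then (p.1, p.2 ++ [j])
      else p) ([], [])

-- one 'for k in range(len(ids)): A[i][ids[k]] = v' write-back loop
def pvWrite (r : List Int) (ids : List Int) (v : Int) : List Int :=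
  (PySem.List.pyRange 0 (ids.length : Int) 1).foldl
    (fun r k => PySem.List.pySetD r (PySem.List.pyGetD ids k 0) v) r

-- the body of the outer loop for row i (reads len(A[0]) as w)
def pvRowA (w : Int) (row : List Int) : List Int :=
  let mm := pvScanMaxMin row w
  let ids := pvIds row mm.1 mm.2
  pvWrite (pvWrite row ids.1 mm.2) ids.2 mm.1

def Transforma_matriz (A : List (List Int)) : List (List Int) :=
  (PySem.List.pyRange 0 (A.length : Int) 1).foldl
    (fun M i =>
      PySem.List.pySetD M i
        (pvRowA ((PySem.List.pyGetD M 0 []).length : Int) (PySem.List.pyGetD M i []))) A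

-- ===== PORT B =====
-- s = sorted(A[i][:w]); swap = {s[-1]: s[0], s[0]: s[-1]}; row rebuilt via swap.get(x, x)
def pvSwapRowB (w : Int) (row : List Int) : List Int :=
  let s := PySem.List.sorted (PySem.List.slice row none (some w)) (fun y => y) false
  let swap := ((PySem.Dict.empty).insert (PySem.List.pyGetD s (-1) 0) (PySem.List.pyGetD s 0 0)).insert
    (PySem.List.pyGetD s 0 0) (PySem.List.pyGetD s (-1) 0)
  row.map (fun x => swap.getD x x)

def Transforma_matriz_alt (A : List (List Int)) : List (List Int) :=
  match A with
  | [] => []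
  | a0 :: _ => A.map (pvSwapRowB (a0.length : Int))

-- ===== PRECONDITION & SPEC =====
-- A raises IndexError when some row is empty (A[i][0]) or shorter than row 0
-- (the max/min scan runs over range(1, len(A[0]))); exactly those inputs are excluded.
def Pre_Transforma_matriz (A : List (List Int)) : Prop :=
  ∀ row ∈ A, 1 ≤ row.length ∧ (A.headD []).length ≤ row.length
instance (A : List (List Int)) : Decidable (Pre_Transforma_matriz A) := by
  unfold Pre_Transforma_matriz; infer_instance

def pvWitness_Transforma_matriz : List (List Int) := [[1, 2], [3, 4]]

def Spec_Transforma_matriz (A : List (List Int)) (out : List (List Int)) : Prop :=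
  out = Transforma_matriz_alt A
instance (A : List (List Int)) (out : List (List Int)) : Decidable (Spec_Transforma_matriz A out) := by
  unfold Spec_Transforma_matriz; infer_instance

-- ===== CLAIM (what is proved, stated in full; the proofs are below) =====
def Claim_equal_Transforma_matriz : Prop :=
  ∀ (A : List (List Int)), Dom_Transforma_matriz A → Pre_Transforma_matriz A →
    Spec_Transforma_matriz A (Transforma_matriz A)

-- ===== LEMMAS AND PROOFS =====

-- pvWrite is a left fold of single writes over the index list
theorem pvWrite_eq (r : List Int) (ids : List Int) (v : Int) :
    pvWrite r ids v = ids.foldl (fun r j => PySem.List.pySetD r j v) r := by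
  simpa [pvWrite] using
    PySem.List.foldl_pyRange_pyGetD' ids 0 (fun r j => PySem.List.pySetD r j v) r (le_refl 0)

-- the id-collecting fold, split into two filters over the Nat range
theorem pvIds_eq (row : List Int) (mx mn : Int) :
    pvIds row mx mn =
      (List.map (fun (j : Nat) => (j : Int)) (List.filter (fun j => decide (row.getD j 0 = mx)) (List.range row.length)),
       List.map (fun (j : Nat) => (j : Int)) (List.filter (fun j => decide (¬ row.getD j 0 = mx ∧ row.getD j 0 = mn)) (List.range row.length))) := by
  unfold pvIds
  have hstep : (fun (p : List Int × List Int) (j : Int) =>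
      if PySem.List.pyGetD row j 0 = mx then (p.1 ++ [j], p.2)
      else if PySem.List.pyGetD row j 0 = mn then (p.1, p.2 ++ [j])
      else p)
    = fun (p : List Int × List Int) j =>
      ((if decide (PySem.List.pyGetD row j 0 = mx) = true then p.1 ++ [id j] else p.1),
       (if decide (¬ PySem.List.pyGetD row j 0 = mx ∧ PySem.List.pyGetD row j 0 = mn) = true then p.2 ++ [id j] else p.2)) := by
    funext p j
    by_cases h1 : PySem.List.pyGetD row j 0 = mx
    · simp [h1]
    · by_cases h2 : PySem.List.pyGetD row j 0 = mn
      · have h1' : ¬ (mn = mx) := by rw [← h2]; exact h1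
        simp [h2, h1']
      · simp [h1, h2]
  rw [hstep,
    PySem.List.foldl_prod_mk
      (fun acc j => if decide (PySem.List.pyGetD row j 0 = mx) = true then acc ++ [id j] else acc)
      (fun acc j => if decide (¬ PySem.List.pyGetD row j 0 = mx ∧ PySem.List.pyGetD row j 0 = mn) = true then acc ++ [id j] else acc),
    PySem.List.foldl_append_if, PySem.List.foldl_append_if]
  simp [PySem.List.pyRange_zero_nat, List.filter_map, Function.comp_def,
    PySem.List.pyGetD_natCast]

-- the elif running max/min scan computes foldl max / foldl min of the first w entries
theorem pvScan_maxmin (l : List Int) (m n : Int) (h : n ≤ m) :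
    l.foldl (fun (p : Int × Int) v =>
        if v > p.1 then (v, p.2)
        else if v < p.2 then (p.1, v)
        else p) (m, n) = (l.foldl max m, l.foldl min n) := by
  induction l generalizing m n with
  | nil => rfl
  | cons v l ih =>
    simp only [List.foldl_cons]
    by_cases hv : v > m
    · rw [if_pos hv, ih _ _ (le_of_lt (lt_of_le_of_lt h hv))]
      rw [max_eq_right (le_of_lt hv), min_eq_left (le_trans h (le_of_lt hv))]
    · rw [if_neg hv]
      by_cases hv2 : v < n
      · rw [if_pos hv2, ih _ _ (le_trans (le_of_lt hv2) h)]
        rw [max_eq_left (not_lt.mp hv), min_eq_right (le_of_lt hv2)]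
      · rw [if_neg hv2, ih _ _ h]
        rw [max_eq_left (not_lt.mp hv), min_eq_left (not_lt.mp hv2)]

theorem pvScan_eq (r0 : Int) (rr : List Int) (w : Nat) (h1 : 1 ≤ w) (h2 : w ≤ rr.length + 1) :
    pvScanMaxMin (r0 :: rr) (w : Int) =
      ((rr.take (w - 1)).foldl max r0, (rr.take (w - 1)).foldl min r0) := by
  obtain ⟨w', rfl⟩ : ∃ w', w = w' + 1 := ⟨w - 1, by omega⟩
  have hpre : ((r0 :: rr).take (w' + 1)).length = w' + 1 := by
    simp [List.length_take]; omega
  unfold pvScanMaxMin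
  rw [PySem.List.pyGetD_zero_cons]
  have hcongr : (PySem.List.pyRange 1 ((w' + 1 : Nat) : Int) 1).foldl
      (fun (p : Int × Int) j =>
        if PySem.List.pyGetD (r0 :: rr) j 0 > p.1 then (PySem.List.pyGetD (r0 :: rr) j 0, p.2)
        else if PySem.List.pyGetD (r0 :: rr) j 0 < p.2 then (p.1, PySem.List.pyGetD (r0 :: rr) j 0)
        else p) (r0, r0)
    = (PySem.List.pyRange 1 ((w' + 1 : Nat) : Int) 1).foldl
      (fun (p : Int × Int) j =>
        if PySem.List.pyGetD ((r0 :: rr).take (w' + 1)) j 0 > p.1 then (PySem.List.pyGetD ((r0 :: rr).take (w' + 1)) j 0, p.2)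
        else if PySem.List.pyGetD ((r0 :: rr).take (w' + 1)) j 0 < p.2 then (p.1, PySem.List.pyGetD ((r0 :: rr).take (w' + 1)) j 0)
        else p) (r0, r0) := by
    apply PySem.List.foldl_congr_mem
    intro acc j hj
    rw [PySem.List.mem_pyRange_one] at hj
    have hget : PySem.List.pyGetD ((r0 :: rr).take (w' + 1)) j 0 = PySem.List.pyGetD (r0 :: rr) j 0 := by
      rw [PySem.List.pyGetD_eq_getElem _ _ (by omega) (by rw [hpre]; omega),
          PySem.List.pyGetD_eq_getElem _ _ (by omega) (by simp; omega)]
      exact List.getElem_take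
    rw [hget]
  rw [hcongr]
  have hw : ((w' + 1 : Nat) : Int) = ((((r0 :: rr).take (w' + 1)).length : Nat) : Int) := by
    rw [hpre]
  rw [hw, PySem.List.foldl_pyRange_pyGetD' ((r0 :: rr).take (w' + 1)) 0
      (fun (p : Int × Int) v =>
        if v > p.1 then (v, p.2) else if v < p.2 then (p.1, v) else p) (r0, r0) (by norm_num)]
  have hdrop : ((r0 :: rr).take (w' + 1)).drop (1 : Int).toNat = rr.take w' := by
    simp [List.take_succ_cons]
  rw [hdrop, pvScan_maxmin _ r0 r0 (le_refl r0)]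
  simp

-- a chain of in-range writes of a constant, read back pointwise
theorem pvSetFold_length (L : List Nat) (v : Int) (r : List Int) :
    (L.foldl (fun r j => r.set j v) r).length = r.length := by
  induction L generalizing r with
  | nil => rfl
  | cons j L ih => simpa using ih (r.set j v)

theorem pvSetFold_getElem? (L : List Nat) (v : Int) (r : List Int) (t : Nat) :
    (L.foldl (fun r j => r.set j v) r)[t]? =
      if t ∈ L ∧ t < r.length then some v else r[t]? := by
  induction L generalizing r with
  | nil => simp
  | cons j L ih =>
    simp only [List.foldl_cons, ih (r.set j v), List.length_set, List.getElem?_set,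
      List.mem_cons]
    by_cases hlen : t < r.length
    · by_cases hL : t ∈ L
      · simp [hL, hlen]
      · by_cases hj : j = t
        · simp [hL, hlen, hj]
        · simp [hL, hlen, hj, Ne.symm hj]
    · have hnone : r[t]? = none := List.getElem?_eq_none (by omega)
      by_cases hj : j = t
      · simp [hlen, hj]
      · simp [hlen, hj]

-- the two id_ passes followed by the two write-back loops equal one swap pass
theorem pvSetDFold_length (ids : List Int) (r : List Int) (v : Int) :
    (ids.foldl (fun r j => PySem.List.pySetD r j v) r).length = r.length := by
  induction ids generalizing r with
  | nil => rfl
  | cons j ids ih => rw [List.foldl_cons, ih, PySem.List.length_pySetD]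

theorem pvSetAppend (p : List (List Int)) (row v : List Int) (r : List (List Int)) :
    (p ++ row :: r).set p.length v = p ++ v :: r := by
  induction p with
  | nil => rfl
  | cons a p ih => simp [List.set_cons_succ, ih]

theorem pvWrites_map (row : List Int) (mx mn : Int) :
    pvWrite (pvWrite row (pvIds row mx mn).1 mn) (pvIds row mx mn).2 mx =
      row.map (fun x => if x = mx then mn else if x = mn then mx else x) := by
  rw [pvWrite_eq, pvWrite_eq, pvIds_eq]
  simp only [List.foldl_map, PySem.List.pySetD_natCast]
  apply List.ext_getElem?
  intro t
  rw [pvSetFold_getElem?, pvSetFold_getElem?, pvSetFold_length]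
  by_cases ht : t < row.length
  · have hget : row.getD t 0 = row[t] := by
      rw [List.getD_eq_getElem?_getD, List.getElem?_eq_getElem ht]; rfl
    simp only [List.getElem?_map, List.getElem?_eq_getElem ht, Option.map_some,
      List.mem_filter, List.mem_range]
    by_cases h1 : row[t] = mx
    · simp [ht, h1]
    · by_cases h2 : row[t] = mn
      · simp [ht, h2]
        split_ifs <;> rfl
      · simp [ht, h1, h2]
  · simp [ht]

-- the minimum of a nonempty list, as foldl min of its tail
theorem pvFoldlMin_char (r0 : Int) (t : List Int) :
    t.foldl min r0 ∈ r0 :: t ∧ ∀ y ∈ r0 :: t, t.foldl min r0 ≤ y := by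
  constructor
  · rcases PySem.List.foldl_min_mem t r0 with h | h
    · rw [h]; exact List.mem_cons_self
    · exact List.mem_cons_of_mem _ h
  · intro y hy
    rcases List.mem_cons.mp hy with rfl | hy
    · exact (PySem.List.foldl_min_le t y).1
    · exact (PySem.List.foldl_min_le t r0).2 y hy

theorem pvFoldlMax_char (r0 : Int) (t : List Int) :
    t.foldl max r0 ∈ r0 :: t ∧ ∀ y ∈ r0 :: t, y ≤ t.foldl max r0 := by
  constructor
  · rcases PySem.List.foldl_max_mem t r0 with h | h
    · rw [h]; exact List.mem_cons_self
    · exact List.mem_cons_of_mem _ h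
  · intro y hy
    rcases List.mem_cons.mp hy with rfl | hy
    · exact (PySem.List.le_foldl_max t y).1
    · exact (PySem.List.le_foldl_max t r0).2 y hy

-- sorted(p)[0] and sorted(p)[-1] are the min and the max of p = r0 :: t
theorem pvSorted_ends (r0 : Int) (t : List Int) :
    PySem.List.pyGetD (PySem.List.sorted (r0 :: t) (fun y => y) false) 0 0 = t.foldl min r0 ∧
    PySem.List.pyGetD (PySem.List.sorted (r0 :: t) (fun y => y) false) (-1) 0 = t.foldl max r0 := by
  have hne : PySem.List.sorted (r0 :: t) (fun y => y) false ≠ [] := by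
    intro h
    exact (List.cons_ne_nil r0 t) ((PySem.List.sorted_eq_nil_iff _ _ _).mp h)
  have hmem : ∀ y, y ∈ PySem.List.sorted (r0 :: t) (fun y => y) false ↔ y ∈ r0 :: t := by
    intro y; exact PySem.List.mem_sorted (r0 :: t) (fun y => y) false y
  obtain ⟨m, s, hs⟩ := List.exists_cons_of_ne_nil hne
  constructor
  · -- head = min
    rw [PySem.List.pyGetD_zero, hs]
    have hle : ∀ y ∈ r0 :: t, m ≤ y := by
      intro y hy
      exact PySem.List.key_head_sorted_le _ _ hs y hy
    have hm_mem : m ∈ r0 :: t := (hmem m).mp (hs ▸ List.mem_cons_self)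
    have h1 : m ≤ t.foldl min r0 := hle _ (pvFoldlMin_char r0 t).1
    have h2 : t.foldl min r0 ≤ m := (pvFoldlMin_char r0 t).2 m hm_mem
    simpa using le_antisymm h1 h2
  · -- last = max
    rw [PySem.List.pyGetD_neg_one _ _ hne]
    have hlast_mem : (PySem.List.sorted (r0 :: t) (fun y => y) false).getLast hne ∈ r0 :: t :=
      (hmem _).mp (List.getLast_mem hne)
    have hge : ∀ y ∈ r0 :: t, y ≤ (PySem.List.sorted (r0 :: t) (fun y => y) false).getLast hne := by
      intro y hy
      obtain ⟨j, hj, hyj⟩ := List.mem_iff_getElem.mp ((hmem y).mpr hy)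
      rw [List.getLast_eq_getElem, ← hyj]
      exact PySem.List.sorted_id_getElem_mono (r0 :: t) (by omega) (by omega)
    have h1 : t.foldl max r0 ≤ _ := hge _ (pvFoldlMax_char r0 t).1
    have h2 : (PySem.List.sorted (r0 :: t) (fun y => y) false).getLast hne ≤ t.foldl max r0 :=
      (pvFoldlMax_char r0 t).2 _ hlast_mem
    exact le_antisymm h2 h1

-- per-row agreement: A's four passes equal B's sort + dictionary substitution
theorem pvRowA_eq (w : Nat) (row : List Int) (h1 : 1 ≤ w) (h2 : w ≤ row.length) :
    pvRowA (w : Int) row = pvSwapRowB (w : Int) row := by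
  obtain ⟨r0, rr, rfl⟩ : ∃ r0 rr, row = r0 :: rr := by
    cases row with
    | nil => simp at h2; omega
    | cons a l => exact ⟨a, l, rfl⟩
  simp only [pvRowA, pvSwapRowB]
  rw [PySem.List.slice_to_natCast]
  have hpre : (r0 :: rr).take w = r0 :: rr.take (w - 1) := by
    obtain ⟨w', rfl⟩ : ∃ w', w = w' + 1 := ⟨w - 1, by omega⟩
    simp [List.take_succ_cons]
  rw [hpre]
  obtain ⟨hlo, hhi⟩ := pvSorted_ends r0 (rr.take (w - 1))
  rw [hlo, hhi, pvScan_eq r0 rr w h1 (by simpa using h2)]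
  rw [pvWrites_map (r0 :: rr) _ _]
  apply List.map_congr_left
  intro x _
  set mx := (rr.take (w - 1)).foldl max r0
  set mn := (rr.take (w - 1)).foldl min r0
  rw [PySem.Dict.getD_insert, PySem.Dict.getD_insert, PySem.Dict.getD_empty]
  by_cases hmm : mn = mx
  · by_cases hx : x = mx <;> simp [hx, hmm]
  · by_cases hx1 : x = mx
    · simp [hx1]
      exact fun h => h.symm
    · by_cases hx2 : x = mn <;> simp [hx1, hx2]

theorem pvRowA_length (w : Int) (row : List Int) : (pvRowA w row).length = row.length := by
  simp only [pvRowA]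
  rw [pvWrite_eq, pvWrite_eq, pvSetDFold_length, pvSetDFold_length]

-- the outer mutation loop is a map over the rows
theorem pvMatFold (w0 : Nat) :
    ∀ (rest pref : List (List Int)),
      ((pref ++ rest).getD 0 []).length = w0 →
      (PySem.List.pyRange (pref.length : Int) (((pref ++ rest).length : Nat) : Int) 1).foldl
        (fun M i =>
          PySem.List.pySetD M i
            (pvRowA ((PySem.List.pyGetD M 0 []).length : Int) (PySem.List.pyGetD M i []))) (pref ++ rest)
        = pref ++ rest.map (fun row => pvRowA (w0 : Int) row) := by
  intro rest
  induction rest with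
  | nil =>
    intro pref hw
    rw [List.append_nil]
    rw [PySem.List.pyRange_one_eq_nil (le_refl _)]
    simp
  | cons row rest ih =>
    intro pref hw
    have hlt : (pref.length : Int) < (((pref ++ row :: rest).length : Nat) : Int) := by
      have : (pref ++ row :: rest).length = pref.length + (rest.length + 1) := by
        simp [List.length_append]
      rw [this]
      push_cast
      omega
    rw [PySem.List.pyRange_one_cons hlt, List.foldl_cons]
    have hgetrow : PySem.List.pyGetD (pref ++ row :: rest) ((pref.length : Nat) : Int) [] = row := by
      rw [PySem.List.pyGetD_natCast]
      simp [List.getD_eq_getElem?_getD]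
    have hget0 : ((PySem.List.pyGetD (pref ++ row :: rest) 0 []).length : Int) = ((w0 : Nat) : Int) := by
      rw [PySem.List.pyGetD_zero, hw]
    rw [hgetrow, hget0]
    have hset : PySem.List.pySetD (pref ++ row :: rest) ((pref.length : Nat) : Int) (pvRowA ((w0 : Nat) : Int) row) = (pref ++ [pvRowA ((w0 : Nat) : Int) row]) ++ rest := by
      rw [PySem.List.pySetD_natCast, pvSetAppend]
      simp
    rw [hset]
    have hb : (((pref ++ row :: rest).length : Nat) : Int) = ((((pref ++ [pvRowA ((w0 : Nat) : Int) row]) ++ rest).length : Nat) : Int) := by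
      simp
    have ha : ((pref.length : Int) + 1) = (((pref ++ [pvRowA ((w0 : Nat) : Int) row]).length : Nat) : Int) := by
      simp
    rw [hb, ha, ih]
    · simp
    · cases pref with
      | nil =>
        simpa [pvRowA_length] using hw
      | cons p0 ps =>
        simpa using hw

-- ===== VERDICT (by name: the statement is the Claim_ definition above) =====
theorem Transforma_matriz_spec : Claim_equal_Transforma_matriz := by
  unfold Claim_equal_Transforma_matriz
  intro A hdom hpre
  unfold Spec_Transforma_matriz
  cases A with
  | nil => rfl
  | cons a0 As =>
    unfold Transforma_matriz Transforma_matriz_alt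
    have h := pvMatFold a0.length (a0 :: As) [] (by simp [List.getD])
    simp only [List.nil_append, List.length_nil, Nat.cast_zero] at h
    rw [h]
    apply List.map_congr_left
    intro row hrow
    obtain ⟨hr1, hr2⟩ := hpre row hrow
    have hw1 : 1 ≤ a0.length := (hpre a0 (by simp)).1
    have hw2 : a0.length ≤ row.length := by simpa using hr2
    exact pvRowA_eq a0.length row hw1 hw2
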